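-- pv_equiv track=rewrite | github.com/colinjansen/advent_of_code | 2019/python/day17.py | find_largest_repeating_subarrays
-- ===== SOURCE A (Python) =====
-- def find_largest_repeating_subarrays(arr, min_length=2):
--     """
--     Find the largest repeating subarrays in the input array.
--
--     Args:
--         arr: Input array/list
--         min_length: Minimum length of subarrays to consider (default: 2)
--
--     Returns:
--         List of tuples, each containing (subarray, list of start indices)
--     """
--     n = len(arr)
--     # Dictionary to store all found subarrays and their occurrences
--     subarrays = {}
--
--     # Try all possible subarray lengths, from longest to shortest
--     for length in range(n-min_length+1, min_length-1, -1):
--         # Try all possible starting positions for this length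
--         for start in range(n - length + 1):
--             # Extract the subarray
--             subarray = tuple(arr[start:start + length])
--
--             # If we haven't seen this subarray before
--             if subarray not in subarrays:
--                 # Find all occurrences
--                 occurrences = []
--                 for i in range(n - length + 1):
--                     if tuple(arr[i:i + length]) == subarray:
--                         occurrences.append(i)
--
--                 # If we found multiple occurrences
--                 if len(occurrences) > 1:
--                     subarrays[subarray] = occurrences
--                     # Since we're going from longest to shortest,
--                     # we can return as soon as we find repeating subarrays
--                     return [(list(subarray), occurrences)]
--
--     return []
-- ===== SOURCE B (Python) =====
-- def find_largest_repeating_subarrays(arr, min_length=2):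
--     n = len(arr)
--     # longest-to-shortest; per length: group all start indices by subarray in ONE pass,
--     # then return the first group (in first-occurrence order) with >= 2 occurrences.
--     for length in range(n - min_length + 1, min_length - 1, -1):
--         occ = {}
--         for i in range(n - length + 1):
--             occ.setdefault(tuple(arr[i:i + length]), []).append(i)
--         for subarray, starts in occ.items():
--             if len(starts) > 1:
--                 return [(list(subarray), starts)]
--     return []
-- ===== Notes on version B (the rewrite author's own statement) =====
-- stated objective: faster
-- what changed: Per candidate length, B replaces A's per-start inner occurrence scan with a single grouping pass (dict of subarray -> start indices) and then returns the first group in insertion order with >= 2 occurrences.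
import Mathlib
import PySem

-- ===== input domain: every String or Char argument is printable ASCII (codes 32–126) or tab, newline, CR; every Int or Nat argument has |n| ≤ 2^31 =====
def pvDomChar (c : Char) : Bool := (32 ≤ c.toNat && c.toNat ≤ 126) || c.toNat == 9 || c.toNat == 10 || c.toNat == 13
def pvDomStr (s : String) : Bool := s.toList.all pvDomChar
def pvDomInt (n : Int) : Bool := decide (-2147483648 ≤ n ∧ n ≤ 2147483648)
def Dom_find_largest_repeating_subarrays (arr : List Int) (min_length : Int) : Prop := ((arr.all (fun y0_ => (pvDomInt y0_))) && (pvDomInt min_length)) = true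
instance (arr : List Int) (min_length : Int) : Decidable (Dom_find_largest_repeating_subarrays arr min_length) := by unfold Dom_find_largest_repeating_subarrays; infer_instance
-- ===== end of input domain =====

-- B replaces A's per-start inner occurrence scan by one grouping pass per length (dict
-- subarray -> start indices) scanned in insertion order; measured faster (asymptotically
-- fewer slice comparisons per length).

-- ===== PORT A =====
-- occurrences loop: for i in range(n - length + 1): if arr[i:i+length] == subarray: append i
def pvAocc (arr : List Int) (length : Int) (subarray : List Int) (n : Int) : List Int :=
  (PySem.List.pyRange 0 (n - length + 1) 1).foldl
    (fun occurrences i =>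
      if PySem.List.slice arr (some i) (some (i + length)) == subarray then occurrences ++ [i]
      else occurrences) []

-- the 'for start in range(n - length + 1)' loop with its early return
def pvAstarts (arr : List Int) (n length : Int) (starts : List Int)
    (subarrays : PySem.Dict (List Int) (List Int)) : Option (List (List Int × List Int)) :=
  match starts with
  | [] => none
  | start :: rest =>
    let subarray := PySem.List.slice arr (some start) (some (start + length))
    if subarrays.contains subarray then pvAstarts arr n length rest subarrays
    else
      let occurrences := pvAocc arr length subarray n
      if occurrences.length > 1 then
        -- Python writes subarrays[subarray] = occurrences and returns at once; the updated
        -- dict is dead after the return, kept here literally as an unused binding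
        let _subarrays := subarrays.insert subarray occurrences
        some [(subarray, occurrences)]
      else pvAstarts arr n length rest subarrays

-- the 'for length in range(n-min_length+1, min_length-1, -1)' loop
def pvAlengths (arr : List Int) (n : Int) (lengths : List Int)
    (subarrays : PySem.Dict (List Int) (List Int)) : List (List Int × List Int) :=
  match lengths with
  | [] => []
  | length :: rest =>
    match pvAstarts arr n length (PySem.List.pyRange 0 (n - length + 1) 1) subarrays with
    | some r => r
    | none => pvAlengths arr n rest subarrays

def find_largest_repeating_subarrays (arr : List Int) (min_length : Int) : List (List Int × List Int) :=
  let n : Int := arr.length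
  pvAlengths arr n (PySem.List.pyRange (n - min_length + 1) (min_length - 1) (-1)) PySem.Dict.empty

-- ===== PORT B =====
-- occ = {}; for i in range(n-length+1): occ.setdefault(tuple(arr[i:i+length]), []).append(i)
def pvBgroup (arr : List Int) (n length : Int) : PySem.Dict (List Int) (List Int) :=
  (PySem.List.pyRange 0 (n - length + 1) 1).foldl
    (fun occ i => occ.modify (PySem.List.slice arr (some i) (some (i + length))) [] (· ++ [i]))
    PySem.Dict.empty

-- for subarray, starts in occ.items(): if len(starts) > 1: return ...
def pvBpick (items : List (List Int × List Int)) : Option (List Int × List Int) :=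
  match items with
  | [] => none
  | (subarray, starts) :: rest =>
    if starts.length > 1 then some (subarray, starts) else pvBpick rest

def pvBlengths (arr : List Int) (n : Int) (lengths : List Int) : List (List Int × List Int) :=
  match lengths with
  | [] => []
  | length :: rest =>
    match pvBpick (pvBgroup arr n length).items with
    | some (subarray, starts) => [(subarray, starts)]
    | none => pvBlengths arr n rest

def find_largest_repeating_subarrays_alt (arr : List Int) (min_length : Int) : List (List Int × List Int) :=
  let n : Int := arr.length
  pvBlengths arr n (PySem.List.pyRange (n - min_length + 1) (min_length - 1) (-1))

-- ===== PRECONDITION & SPEC =====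
def Spec_find_largest_repeating_subarrays (arr : List Int) (min_length : Int) (out : List (List Int × List Int)) : Prop := out = find_largest_repeating_subarrays_alt arr min_length
instance (arr : List Int) (min_length : Int) (out : List (List Int × List Int)) : Decidable (Spec_find_largest_repeating_subarrays arr min_length out) := by unfold Spec_find_largest_repeating_subarrays; infer_instance

-- ===== CLAIM (what is proved, stated in full; the proofs are below) =====
def Claim_equal_find_largest_repeating_subarrays : Prop := ∀ (arr : List Int) (min_length : Int), Dom_find_largest_repeating_subarrays arr min_length → Spec_find_largest_repeating_subarrays arr min_length (find_largest_repeating_subarrays arr min_length)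

-- ===== LEMMAS AND PROOFS =====

-- the subarray starting at i, and the list of starts whose subarray equals k
def pvKey (arr : List Int) (L i : Int) : List Int :=
  PySem.List.slice arr (some i) (some (i + L))

def pvG (arr : List Int) (L : Int) (starts : List Int) (k : List Int) : List Int :=
  starts.filter (fun i => pvKey arr L i == k)

theorem pv_find?_foldl_add {α : Type} [BEq α] [LawfulBEq α] (q : α → Bool) :
    ∀ (L s : List α),
      (L.foldl PySem.Set.add s).find? q
        = (s.find? q).or (L.find? (fun y => !decide (y ∈ s) && q y)) := by
  intro L
  induction L with
  | nil => intro s; simp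
  | cons x t ih =>
    intro s
    simp only [List.foldl_cons, ih (PySem.Set.add s x)]
    by_cases hx : x ∈ s
    · have hadd : PySem.Set.add s x = s := by simp [PySem.Set.add, PySem.Set.contains, hx]
      simp [hx]
    · have hadd : PySem.Set.add s x = s ++ [x] := by simp [PySem.Set.add, PySem.Set.contains, hx]
      rw [hadd]
      by_cases hqx : q x = true
      · simp [List.find?_append, hqx, hx]
      · simp only [Bool.not_eq_true] at hqx
        have hpred : (fun y => !decide (y ∈ s ++ [x]) && q y)
            = (fun y => !decide (y ∈ s) && q y) := by
          funext y
          by_cases hqy : q y = true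
          · have hyx : y ≠ x := by intro h; rw [h, hqx] at hqy; simp at hqy
            simp [List.mem_append, hyx, hqy]
          · simp only [Bool.not_eq_true] at hqy; simp [hqy]
        simp [List.find?_append, hqx, hx, hpred]

-- find? over set(xs) (first-occurrence dedup) equals find? over xs
theorem pv_find?_ofList {α : Type} [BEq α] [LawfulBEq α] (q : α → Bool) (L : List α) :
    (PySem.Set.ofList L).find? q = L.find? q := by
  have := pv_find?_foldl_add q L []
  simpa [PySem.Set.ofList_eq_foldl] using this

-- A's inner occurrence loop is a filter
theorem pvAocc_eq (arr : List Int) (L n : Int) (sub : List Int) :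
    pvAocc arr L sub n = pvG arr L (PySem.List.pyRange 0 (n - L + 1) 1) sub := by
  unfold pvAocc pvG pvKey
  simp only [PySem.List.foldl_append_ite_eq_filter, List.nil_append]
  refine List.filter_congr (fun i _ => ?_)
  by_cases h : PySem.List.slice arr (some i) (some (i + L)) = sub
  · simp [h]
  · simp [beq_eq_false_iff_ne, h]

-- A's start loop over an empty dict is a find? over the starts
theorem pvAstarts_eq (arr : List Int) (n L : Int) (ss : List Int) :
    pvAstarts arr n L ss PySem.Dict.empty
      = (ss.find? (fun s =>
            decide (1 < (pvG arr L (PySem.List.pyRange 0 (n - L + 1) 1) (pvKey arr L s)).length))).map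
          (fun s => [(pvKey arr L s,
                      pvG arr L (PySem.List.pyRange 0 (n - L + 1) 1) (pvKey arr L s))]) := by
  induction ss with
  | nil => rfl
  | cons s rest ih =>
    rw [pvAstarts, List.find?_cons]
    simp only [PySem.Dict.contains_empty, Bool.false_eq_true, if_false, pvAocc_eq]
    have hsub : PySem.List.slice arr (some s) (some (s + L)) = pvKey arr L s := rfl
    rw [hsub]
    by_cases h : 1 < (pvG arr L (PySem.List.pyRange 0 (n - L + 1) 1) (pvKey arr L s)).length
    · simp [h]
    · simp [h, ih]

-- B's grouping dict: items = first-occurrence-ordered keys paired with their start groups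
theorem pvBgroup_pairs (arr : List Int) (n L : Int) :
    pvBgroup arr n L
      = ((PySem.List.pyRange 0 (n - L + 1) 1).map (fun i => (pvKey arr L i, i))).foldl
          (fun d p => d.modify p.1 [] (fun v => v ++ [p.2])) PySem.Dict.empty := by
  unfold pvBgroup
  rw [List.foldl_map]
  rfl

theorem pvBgroup_items (arr : List Int) (n L : Int) :
    (pvBgroup arr n L).items
      = (PySem.Set.ofList ((PySem.List.pyRange 0 (n - L + 1) 1).map (pvKey arr L))).map
          (fun k => (k, pvG arr L (PySem.List.pyRange 0 (n - L + 1) 1) k)) := by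
  have hkeys : (pvBgroup arr n L).keys
      = PySem.Set.ofList ((PySem.List.pyRange 0 (n - L + 1) 1).map (pvKey arr L)) := by
    rw [pvBgroup_pairs,
      PySem.Dict.keys_foldl_modify_key (key := Prod.fst) (f := fun _ p => (· ++ [p.2]))]
    simp [PySem.Set.update_nil_left, List.map_map, Function.comp_def]
  have hnd : (pvBgroup arr n L).keys.Nodup := by
    rw [pvBgroup_pairs]
    exact PySem.Dict.nodup_keys_foldl_modify_key _ Prod.fst [] _ _
      PySem.Dict.nodup_keys_empty
  have hgetD : ∀ k, (pvBgroup arr n L).getD k []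
      = pvG arr L (PySem.List.pyRange 0 (n - L + 1) 1) k := by
    intro k
    rw [pvBgroup_pairs, PySem.Dict.getD_foldl_modify_append]
    simp [pvG, List.filter_map, Function.comp_def]
  rw [PySem.Dict.items_eq_map_keys _ hnd [], hkeys]
  exact List.map_congr_left (fun k _ => by rw [hgetD k])

-- B's item scan is a find?
theorem pvBpick_eq (items : List (List Int × List Int)) :
    pvBpick items = items.find? (fun p => decide (1 < p.2.length)) := by
  induction items with
  | nil => rfl
  | cons p rest ih =>
    obtain ⟨sub, starts⟩ := p
    rw [pvBpick]
    by_cases h : 1 < starts.length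
    · simp [h, gt_iff_lt]
    · simp [h, gt_iff_lt, ih]

-- the two per-length computations agree
theorem pv_perLength (arr : List Int) (n L : Int) :
    pvAstarts arr n L (PySem.List.pyRange 0 (n - L + 1) 1) PySem.Dict.empty
      = (pvBpick (pvBgroup arr n L).items).map (fun p => [(p.1, p.2)]) := by
  rw [pvAstarts_eq, pvBpick_eq, pvBgroup_items, List.find?_map, pv_find?_ofList,
    List.find?_map, Option.map_map, Option.map_map]
  rfl

-- the two outer loops agree on any list of candidate lengths
theorem pv_outer (arr : List Int) (n : Int) (lengths : List Int) :
    pvAlengths arr n lengths PySem.Dict.empty = pvBlengths arr n lengths := by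
  induction lengths with
  | nil => rfl
  | cons L rest ih =>
    rw [pvAlengths, pvBlengths, pv_perLength]
    cases h : pvBpick (pvBgroup arr n L).items with
    | none => simpa using ih
    | some p => simp

-- ===== VERDICT (by name: the statement is the Claim_ definition above) =====
theorem find_largest_repeating_subarrays_spec : Claim_equal_find_largest_repeating_subarrays := by
  intro arr min_length _
  unfold Spec_find_largest_repeating_subarrays find_largest_repeating_subarrays
    find_largest_repeating_subarrays_alt
  exact pv_outer arr arr.length _
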